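-- pv_equiv track=rewrite | github.com/Ali-E/WeightedAligner | align.py | compute_alignment_matrix_1
-- ===== SOURCE A (Python) =====
-- def compute_alignment_matrix_1(seq_x, seq_y, scoring_matrix, global_flag):
--     """
--     The function computes and returns the alignment matrix for seq_x and seq_y as described in the Homework.
--     computes the max_amount of the matrix.
--     """
--     max_amount = -1
--     a_matrix = [[0 for dummy_idx_2 in range(len(seq_y) + 1)] for dummy_idx in range(len(seq_x) + 1)]
--
--     for idx_x in range(1, len(seq_x) + 1):
--         temp = a_matrix[idx_x - 1][0] + scoring_matrix[seq_x[idx_x - 1]]['-']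
--         if global_flag == 0 and temp < 0:
--             temp = 0
--         if temp > max_amount:
--             max_amount = temp
--         a_matrix[idx_x][0] = temp
--
--     for idx_y in range(1, len(seq_y) + 1):
--         temp = a_matrix[0][idx_y - 1] + scoring_matrix['-'][seq_y[idx_y - 1]]
--         if global_flag == 0 and temp < 0:
--             temp = 0
--         if temp > max_amount:
--             max_amount = temp
--         a_matrix[0][idx_y] = temp
--
--     for idx_1 in range(1, len(seq_x) + 1):
--         for idx_2 in range(1, len(seq_y) + 1):
--             temp = max(a_matrix[idx_1 - 1][idx_2] + scoring_matrix[seq_x[idx_1 - 1]]['-'],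
--                        a_matrix[idx_1][idx_2 - 1] + scoring_matrix['-'][seq_y[idx_2 - 1]],
--                        a_matrix[idx_1 - 1][idx_2 - 1] + scoring_matrix[seq_x[idx_1 - 1]][seq_y[idx_2 - 1]])
--             if global_flag == 0 and temp < 0:
--                 temp = 0
--             if temp > max_amount:
--                 max_amount = temp
--             a_matrix[idx_1][idx_2] = temp
--
--     return max_amount
-- ===== SOURCE B (Python) =====
-- def compute_alignment_matrix_1(seq_x, seq_y, scoring_matrix, global_flag):
--     """Top-down memoized recursion per cell, then a separate reduction pass
--     taking the max over every cell except (0, 0), seeded with -1."""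
--     memo = {}
--
--     def cell(i, j):
--         if (i, j) in memo:
--             return memo[(i, j)]
--         if i == 0 and j == 0:
--             v = 0
--         elif j == 0:
--             v = cell(i - 1, 0) + scoring_matrix[seq_x[i - 1]]['-']
--         elif i == 0:
--             v = cell(0, j - 1) + scoring_matrix['-'][seq_y[j - 1]]
--         else:
--             v = max(cell(i - 1, j) + scoring_matrix[seq_x[i - 1]]['-'],
--                     cell(i, j - 1) + scoring_matrix['-'][seq_y[j - 1]],
--                     cell(i - 1, j - 1) + scoring_matrix[seq_x[i - 1]][seq_y[j - 1]])
--         if global_flag == 0 and v < 0: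
--             v = 0
--         memo[(i, j)] = v
--         return v
--
--     best = -1
--     for i in range(len(seq_x) + 1):
--         for j in range(len(seq_y) + 1):
--             if i == 0 and j == 0:
--                 continue
--             best = max(best, cell(i, j))
--     return best
-- ===== Notes on version B (the rewrite author's own statement) =====
-- stated objective: alternative
-- what changed: B replaces A's bottom-up matrix fill with interleaved max tracking by a top-down memoized recursion defining each cell from the alignment recurrence, followed by a separate reduction pass taking the max over every cell except (0,0) seeded with -1.
import Mathlib
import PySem

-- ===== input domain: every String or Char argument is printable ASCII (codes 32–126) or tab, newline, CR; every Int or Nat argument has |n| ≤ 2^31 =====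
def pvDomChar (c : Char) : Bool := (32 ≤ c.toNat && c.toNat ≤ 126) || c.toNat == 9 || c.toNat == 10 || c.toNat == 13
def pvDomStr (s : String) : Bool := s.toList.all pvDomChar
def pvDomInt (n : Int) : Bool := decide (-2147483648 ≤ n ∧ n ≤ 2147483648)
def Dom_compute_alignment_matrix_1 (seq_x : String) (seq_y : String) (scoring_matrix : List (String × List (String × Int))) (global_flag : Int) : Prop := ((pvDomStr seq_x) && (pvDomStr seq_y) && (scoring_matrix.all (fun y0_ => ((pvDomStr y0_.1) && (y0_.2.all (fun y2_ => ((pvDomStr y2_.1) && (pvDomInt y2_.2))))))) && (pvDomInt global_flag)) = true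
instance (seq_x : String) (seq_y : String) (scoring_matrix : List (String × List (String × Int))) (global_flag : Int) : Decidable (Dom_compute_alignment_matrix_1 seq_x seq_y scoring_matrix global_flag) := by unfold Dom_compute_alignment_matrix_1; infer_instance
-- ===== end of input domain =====

-- B replaces A's bottom-up matrix fill with interleaved max tracking by a top-down
-- recursion defining each cell from the alignment recurrence (the Python memo caches
-- values only and does not change them), followed by a separate reduction pass taking
-- the max over every cell except (0,0) seeded with -1 (alternative decomposition).

-- shared helper of both ports: scoring_matrix[a][b] totalised with defaults
-- (under Pre_ every executed lookup exists, so it computes exactly Python's dict lookups)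
def pvLook (sm : List (String × List (String × Int))) (a b : String) : Int :=
  PySem.Dict.getD (PySem.Dict.mk (PySem.Dict.getD (PySem.Dict.mk sm) a [])) b 0

-- one-character Python string seq[i]
def pvChS (c : Char) : String := String.ofList [c]

-- ===== PORT A =====
-- a_matrix modelled as a function (Nat × Nat) → Int; in-place assignment = pointwise update
def pvMatUpd (M : Nat × Nat → Int) (p : Nat × Nat) (v : Int) : Nat × Nat → Int :=
  fun q => if q = p then v else M q

def compute_alignment_matrix_1 (seq_x : String) (seq_y : String) (scoring_matrix : List (String × List (String × Int))) (global_flag : Int) : Int :=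
  let xs := seq_x.toList
  let ys := seq_y.toList
  -- max_amount = -1; a_matrix = all zeros
  let st0 : ((Nat × Nat → Int) × Int) := (fun _ => 0, -1)
  -- for idx_x in range(1, len(seq_x)+1)  (i = idx_x - 1)
  let st1 := (List.range xs.length).foldl (fun st i =>
      let t0 := st.1 (i, 0) + pvLook scoring_matrix (pvChS (xs.getD i ' ')) "-"
      let temp := if global_flag = 0 ∧ t0 < 0 then 0 else t0
      (pvMatUpd st.1 (i + 1, 0) temp, if temp > st.2 then temp else st.2)) st0
  -- for idx_y in range(1, len(seq_y)+1)  (j = idx_y - 1)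
  let st2 := (List.range ys.length).foldl (fun st j =>
      let t0 := st.1 (0, j) + pvLook scoring_matrix "-" (pvChS (ys.getD j ' '))
      let temp := if global_flag = 0 ∧ t0 < 0 then 0 else t0
      (pvMatUpd st.1 (0, j + 1) temp, if temp > st.2 then temp else st.2)) st1
  -- nested loops over the interior
  let st3 := (List.range xs.length).foldl (fun st i =>
      (List.range ys.length).foldl (fun st j =>
        let t0 := max (max (st.1 (i, j + 1) + pvLook scoring_matrix (pvChS (xs.getD i ' ')) "-")
                           (st.1 (i + 1, j) + pvLook scoring_matrix "-" (pvChS (ys.getD j ' '))))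
                      (st.1 (i, j) + pvLook scoring_matrix (pvChS (xs.getD i ' ')) (pvChS (ys.getD j ' ')))
        let temp := if global_flag = 0 ∧ t0 < 0 then 0 else t0
        (pvMatUpd st.1 (i + 1, j + 1) temp, if temp > st.2 then temp else st.2)) st) st2
  st3.2

-- ===== PORT B =====
def pvClamp (global_flag v : Int) : Int := if global_flag = 0 ∧ v < 0 then 0 else v

-- B's recursive cell(i, j); the Python memo only caches values, so the values are this recursion
def pvCell (xs ys : List Char) (sm : List (String × List (String × Int))) (g : Int) : Nat → Nat → Int
  | 0, 0 => pvClamp g 0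
  | i + 1, 0 => pvClamp g (pvCell xs ys sm g i 0 + pvLook sm (pvChS (xs.getD i ' ')) "-")
  | 0, j + 1 => pvClamp g (pvCell xs ys sm g 0 j + pvLook sm "-" (pvChS (ys.getD j ' ')))
  | i + 1, j + 1 =>
      pvClamp g (max (max (pvCell xs ys sm g i (j + 1) + pvLook sm (pvChS (xs.getD i ' ')) "-")
                          (pvCell xs ys sm g (i + 1) j + pvLook sm "-" (pvChS (ys.getD j ' '))))
                     (pvCell xs ys sm g i j + pvLook sm (pvChS (xs.getD i ' ')) (pvChS (ys.getD j ' '))))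

def compute_alignment_matrix_1_alt (seq_x : String) (seq_y : String) (scoring_matrix : List (String × List (String × Int))) (global_flag : Int) : Int :=
  let xs := seq_x.toList
  let ys := seq_y.toList
  (List.range (xs.length + 1)).foldl (fun best i =>
    (List.range (ys.length + 1)).foldl (fun best j =>
      if i = 0 ∧ j = 0 then best
      else max best (pvCell xs ys scoring_matrix global_flag i j)) best) (-1)

-- ===== PRECONDITION & SPEC =====
-- Pre_ excludes exactly the inputs where Python A raises KeyError: some executed
-- scoring_matrix lookup (row for a character of seq_x, its '-' and seq_y entries,
-- or the '-' row's seq_y entries) is missing.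
def pvLookOK (sm : List (String × List (String × Int))) (a b : String) : Bool :=
  ((PySem.Dict.get? (PySem.Dict.mk sm) a).bind (fun r => PySem.Dict.get? (PySem.Dict.mk r) b)).isSome

def Pre_compute_alignment_matrix_1 (seq_x : String) (seq_y : String) (scoring_matrix : List (String × List (String × Int))) (global_flag : Int) : Prop :=
  (seq_x.toList.all (fun c => pvLookOK scoring_matrix (pvChS c) "-"
      && seq_y.toList.all (fun d => pvLookOK scoring_matrix (pvChS c) (pvChS d)))
   && seq_y.toList.all (fun d => pvLookOK scoring_matrix "-" (pvChS d))) = true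
instance (seq_x : String) (seq_y : String) (scoring_matrix : List (String × List (String × Int))) (global_flag : Int) : Decidable (Pre_compute_alignment_matrix_1 seq_x seq_y scoring_matrix global_flag) := by unfold Pre_compute_alignment_matrix_1; infer_instance

def pvWitness_compute_alignment_matrix_1 : String × String × (List (String × List (String × Int))) × Int :=
  ("AB", "B", [("A", [("-", -2), ("A", 3), ("B", -1)]), ("B", [("-", -2), ("A", -1), ("B", 3)]), ("-", [("-", 0), ("A", -2), ("B", -2)])], 0)

def Spec_compute_alignment_matrix_1 (seq_x : String) (seq_y : String) (scoring_matrix : List (String × List (String × Int))) (global_flag : Int) (out : Int) : Prop := out = compute_alignment_matrix_1_alt seq_x seq_y scoring_matrix global_flag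
instance (seq_x : String) (seq_y : String) (scoring_matrix : List (String × List (String × Int))) (global_flag : Int) (out : Int) : Decidable (Spec_compute_alignment_matrix_1 seq_x seq_y scoring_matrix global_flag out) := by unfold Spec_compute_alignment_matrix_1; infer_instance

-- ===== CLAIM (what is proved, stated in full; the proofs are below) =====
def Claim_equal_compute_alignment_matrix_1 : Prop := ∀ (seq_x : String) (seq_y : String) (scoring_matrix : List (String × List (String × Int))) (global_flag : Int), Dom_compute_alignment_matrix_1 seq_x seq_y scoring_matrix global_flag → Pre_compute_alignment_matrix_1 seq_x seq_y scoring_matrix global_flag → Spec_compute_alignment_matrix_1 seq_x seq_y scoring_matrix global_flag (compute_alignment_matrix_1 seq_x seq_y scoring_matrix global_flag)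

-- ===== LEMMAS AND PROOFS =====

theorem pvCell_zero_zero (xs ys : List Char) (sm : List (String × List (String × Int))) (g : Int) :
    pvCell xs ys sm g 0 0 = 0 := by
  simp [pvCell, pvClamp]

theorem pvCell_succ_zero (xs ys : List Char) (sm : List (String × List (String × Int))) (g : Int) (i : Nat) :
    pvCell xs ys sm g (i + 1) 0 =
      pvClamp g (pvCell xs ys sm g i 0 + pvLook sm (pvChS (xs.getD i ' ')) "-") := by
  simp [pvCell]

theorem pvCell_zero_succ (xs ys : List Char) (sm : List (String × List (String × Int))) (g : Int) (j : Nat) :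
    pvCell xs ys sm g 0 (j + 1) =
      pvClamp g (pvCell xs ys sm g 0 j + pvLook sm "-" (pvChS (ys.getD j ' '))) := by
  simp [pvCell]

theorem pvCell_succ_succ (xs ys : List Char) (sm : List (String × List (String × Int))) (g : Int) (i j : Nat) :
    pvCell xs ys sm g (i + 1) (j + 1) =
      pvClamp g (max (max (pvCell xs ys sm g i (j + 1) + pvLook sm (pvChS (xs.getD i ' ')) "-")
                          (pvCell xs ys sm g (i + 1) j + pvLook sm "-" (pvChS (ys.getD j ' '))))
                     (pvCell xs ys sm g i j + pvLook sm (pvChS (xs.getD i ' ')) (pvChS (ys.getD j ' ')))) := by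
  simp [pvCell]

theorem pvMaxIf (a b : Int) : (if a > b then a else b) = max b a := by
  rcases le_total a b with h | h <;> simp [max_def] <;> omega

-- A's matrix after k iterations of the first loop
def MA1 (xs ys : List Char) (sm : List (String × List (String × Int))) (g : Int) (k : Nat) : Nat × Nat → Int :=
  fun q => if q.2 = 0 ∧ q.1 ≤ k then pvCell xs ys sm g q.1 0 else 0

def accEdgeX (xs ys : List Char) (sm : List (String × List (String × Int))) (g : Int) (k : Nat) : List Int :=
  (List.range k).map (fun i => pvCell xs ys sm g (i + 1) 0)

theorem MA1_zero (xs ys : List Char) (sm : List (String × List (String × Int))) (g : Int) :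
    MA1 xs ys sm g 0 = (fun _ => 0) := by
  funext q; obtain ⟨a, b⟩ := q
  simp only [MA1]
  split_ifs with h
  · obtain ⟨hb, ha⟩ := h
    have ha0 : a = 0 := by omega
    subst ha0; subst hb; exact pvCell_zero_zero xs ys sm g
  · rfl

theorem MA1_upd (xs ys : List Char) (sm : List (String × List (String × Int))) (g : Int) (k : Nat) :
    pvMatUpd (MA1 xs ys sm g k) (k + 1, 0) (pvCell xs ys sm g (k + 1) 0) = MA1 xs ys sm g (k + 1) := by
  funext q; obtain ⟨a, b⟩ := q
  by_cases h1 : a = k + 1 ∧ b = 0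
  · obtain ⟨rfl, rfl⟩ := h1
    simp [pvMatUpd, MA1]
  · simp only [pvMatUpd, MA1, Prod.mk.injEq]
    rw [if_neg (by simpa [Prod.ext_iff] using h1)]
    split_ifs with h2 h3 <;> first | rfl | (exfalso; omega)

theorem stage1 (xs ys : List Char) (sm : List (String × List (String × Int))) (g : Int) (k : Nat) (bacc : Int) :
    (List.range k).foldl (fun (st : (Nat × Nat → Int) × Int) i =>
      let t0 := st.1 (i, 0) + pvLook sm (pvChS (xs.getD i ' ')) "-"
      let temp := if g = 0 ∧ t0 < 0 then 0 else t0
      (pvMatUpd st.1 (i + 1, 0) temp, if temp > st.2 then temp else st.2)) (MA1 xs ys sm g 0, bacc)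
    = (MA1 xs ys sm g k, (accEdgeX xs ys sm g k).foldl (fun b v => max b v) bacc) := by
  induction k with
  | zero => rfl
  | succ k ih =>
    rw [List.range_succ, List.foldl_append, ih]
    simp only [List.foldl_cons, List.foldl_nil]
    have hread : MA1 xs ys sm g k (k, 0) = pvCell xs ys sm g k 0 := by simp [MA1]
    have htemp : (if g = 0 ∧ (MA1 xs ys sm g k) (k, 0) + pvLook sm (pvChS (xs.getD k ' ')) "-" < 0 then 0
        else (MA1 xs ys sm g k) (k, 0) + pvLook sm (pvChS (xs.getD k ' ')) "-") = pvCell xs ys sm g (k + 1) 0 := by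
      rw [hread, pvCell_succ_zero]; rfl
    refine Prod.ext ?_ ?_
    · show pvMatUpd (MA1 xs ys sm g k) (k + 1, 0) _ = _
      rw [htemp, MA1_upd]
    · show (if _ > _ then _ else _) = _
      rw [htemp, pvMaxIf]
      have : accEdgeX xs ys sm g (k + 1) = accEdgeX xs ys sm g k ++ [pvCell xs ys sm g (k + 1) 0] := by
        simp [accEdgeX, List.range_succ]
      rw [this, List.foldl_append]; rfl

-- A's matrix after the first loop and k iterations of the second loop
def MA2 (xs ys : List Char) (sm : List (String × List (String × Int))) (g : Int) (k : Nat) : Nat × Nat → Int :=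
  fun q => if q.2 = 0 ∧ q.1 ≤ xs.length then pvCell xs ys sm g q.1 0
           else if q.1 = 0 ∧ q.2 ≤ k then pvCell xs ys sm g 0 q.2 else 0

def accEdgeY (xs ys : List Char) (sm : List (String × List (String × Int))) (g : Int) (k : Nat) : List Int :=
  (List.range k).map (fun j => pvCell xs ys sm g 0 (j + 1))

theorem MA2_zero (xs ys : List Char) (sm : List (String × List (String × Int))) (g : Int) :
    MA2 xs ys sm g 0 = MA1 xs ys sm g xs.length := by
  funext q; obtain ⟨a, b⟩ := q
  simp only [MA2, MA1]
  split_ifs with h1 h2 <;> first | rfl | (exfalso; omega)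

theorem MA2_read (xs ys : List Char) (sm : List (String × List (String × Int))) (g : Int) (k : Nat) :
    MA2 xs ys sm g k (0, k) = pvCell xs ys sm g 0 k := by
  by_cases hk0 : k = 0
  · subst hk0; simp [MA2]
  · simp only [MA2]
    rw [if_neg (by simp [hk0]), if_pos (by simp)]

theorem MA2_upd (xs ys : List Char) (sm : List (String × List (String × Int))) (g : Int) (k : Nat) :
    pvMatUpd (MA2 xs ys sm g k) (0, k + 1) (pvCell xs ys sm g 0 (k + 1)) = MA2 xs ys sm g (k + 1) := by
  funext q; obtain ⟨a, b⟩ := q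
  by_cases h1 : a = 0 ∧ b = k + 1
  · obtain ⟨rfl, rfl⟩ := h1
    simp only [pvMatUpd, MA2]
    split_ifs with h2 h3 <;> first | rfl | (exfalso; omega) | (exfalso; simp_all)
  · simp only [pvMatUpd]
    rw [if_neg (by simpa [Prod.ext_iff] using h1)]
    simp only [MA2]
    split_ifs with h2 h3 h4 <;> first | rfl | (exfalso; omega) | (exfalso; simp_all; omega)

theorem stage2 (xs ys : List Char) (sm : List (String × List (String × Int))) (g : Int) (k : Nat)
    (hk : k ≤ ys.length) (bacc : Int) :
    (List.range k).foldl (fun (st : (Nat × Nat → Int) × Int) j =>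
      let t0 := st.1 (0, j) + pvLook sm "-" (pvChS (ys.getD j ' '))
      let temp := if g = 0 ∧ t0 < 0 then 0 else t0
      (pvMatUpd st.1 (0, j + 1) temp, if temp > st.2 then temp else st.2)) (MA2 xs ys sm g 0, bacc)
    = (MA2 xs ys sm g k, (accEdgeY xs ys sm g k).foldl (fun b v => max b v) bacc) := by
  induction k with
  | zero => rfl
  | succ k ih =>
    rw [List.range_succ, List.foldl_append, ih (by omega)]
    simp only [List.foldl_cons, List.foldl_nil]
    have htemp : (if g = 0 ∧ (MA2 xs ys sm g k) (0, k) + pvLook sm "-" (pvChS (ys.getD k ' ')) < 0 then 0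
        else (MA2 xs ys sm g k) (0, k) + pvLook sm "-" (pvChS (ys.getD k ' '))) = pvCell xs ys sm g 0 (k + 1) := by
      rw [MA2_read, pvCell_zero_succ]; rfl
    refine Prod.ext ?_ ?_
    · show pvMatUpd (MA2 xs ys sm g k) (0, k + 1) _ = _
      rw [htemp, MA2_upd]
    · show (if _ > _ then _ else _) = _
      rw [htemp, pvMaxIf]
      have : accEdgeY xs ys sm g (k + 1) = accEdgeY xs ys sm g k ++ [pvCell xs ys sm g 0 (k + 1)] := by
        simp [accEdgeY, List.range_succ]
      rw [this, List.foldl_append]; rfl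

-- A's matrix during the interior double loop: edges, full rows ≤ k, and row k+1 up to column l
def MA3 (xs ys : List Char) (sm : List (String × List (String × Int))) (g : Int) (k l : Nat) : Nat × Nat → Int :=
  fun q => if (q.2 = 0 ∧ q.1 ≤ xs.length) ∨ (q.1 = 0 ∧ q.2 ≤ ys.length) ∨
              (1 ≤ q.1 ∧ q.1 ≤ xs.length ∧ q.2 ≤ ys.length ∧ (q.1 ≤ k ∨ (q.1 = k + 1 ∧ q.2 ≤ l)))
           then pvCell xs ys sm g q.1 q.2 else 0

def accRow (xs ys : List Char) (sm : List (String × List (String × Int))) (g : Int) (k l : Nat) : List Int :=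
  (List.range l).map (fun j => pvCell xs ys sm g (k + 1) (j + 1))

def accInt (xs ys : List Char) (sm : List (String × List (String × Int))) (g : Int) (k : Nat) : List Int :=
  (List.range k).flatMap (fun i => accRow xs ys sm g i ys.length)

theorem MA3_zero (xs ys : List Char) (sm : List (String × List (String × Int))) (g : Int) :
    MA3 xs ys sm g 0 0 = MA2 xs ys sm g ys.length := by
  funext q; obtain ⟨a, b⟩ := q
  by_cases hb : b = 0
  · subst hb; simp only [MA3, MA2]; split_ifs <;> first | rfl | (exfalso; omega) | simp_all | (exfalso; simp_all) | (exfalso; simp_all; omega) | (simp_all; omega)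
  · by_cases ha : a = 0
    · subst ha; simp only [MA3, MA2]; split_ifs <;> first | rfl | (exfalso; omega) | simp_all | (exfalso; simp_all) | (exfalso; simp_all; omega) | (simp_all; omega)
    · simp only [MA3, MA2]; split_ifs <;> first | rfl | (exfalso; omega) | simp_all | (exfalso; simp_all) | (exfalso; simp_all; omega) | (simp_all; omega)

theorem MA3_rowend (xs ys : List Char) (sm : List (String × List (String × Int))) (g : Int) (k : Nat) :
    MA3 xs ys sm g k ys.length = MA3 xs ys sm g (k + 1) 0 := by
  funext q; obtain ⟨a, b⟩ := q
  simp only [MA3]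
  split_ifs <;> first | rfl | (exfalso; omega)

theorem MA3_read1 (xs ys : List Char) (sm : List (String × List (String × Int))) (g : Int)
    {k l : Nat} (hk : k < xs.length) (hl : l < ys.length) :
    MA3 xs ys sm g k l (k, l + 1) = pvCell xs ys sm g k (l + 1) := by
  simp only [MA3]; rw [if_pos (by (try simp only [true_and]); omega)]

theorem MA3_read2 (xs ys : List Char) (sm : List (String × List (String × Int))) (g : Int)
    {k l : Nat} (hk : k < xs.length) (hl : l < ys.length) :
    MA3 xs ys sm g k l (k + 1, l) = pvCell xs ys sm g (k + 1) l := by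
  simp only [MA3]; rw [if_pos (by (try simp only [true_and]); omega)]

theorem MA3_read3 (xs ys : List Char) (sm : List (String × List (String × Int))) (g : Int)
    {k l : Nat} (hk : k < xs.length) (hl : l < ys.length) :
    MA3 xs ys sm g k l (k, l) = pvCell xs ys sm g k l := by
  simp only [MA3]; rw [if_pos (by (try simp only [true_and]); omega)]

theorem MA3_upd (xs ys : List Char) (sm : List (String × List (String × Int))) (g : Int)
    {k l : Nat} (hk : k < xs.length) (hl : l < ys.length) :
    pvMatUpd (MA3 xs ys sm g k l) (k + 1, l + 1) (pvCell xs ys sm g (k + 1) (l + 1)) = MA3 xs ys sm g k (l + 1) := by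
  funext q; obtain ⟨a, b⟩ := q
  by_cases h1 : a = k + 1 ∧ b = l + 1
  · obtain ⟨rfl, rfl⟩ := h1
    simp only [pvMatUpd]
    rw [if_true]
    simp only [MA3]
    split_ifs with h2 h3 <;>
      first
        | rfl
        | (exfalso; (try simp only [false_and, false_or, true_and] at *); omega)
  · simp only [pvMatUpd]
    rw [if_neg (by simpa [Prod.ext_iff] using h1)]
    simp only [MA3]
    split_ifs <;> first | rfl | (exfalso; omega)

theorem stage3_inner (xs ys : List Char) (sm : List (String × List (String × Int))) (g : Int)
    {k : Nat} (hk : k < xs.length) :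
    ∀ l, l ≤ ys.length → ∀ bacc : Int,
    (List.range l).foldl (fun (st : (Nat × Nat → Int) × Int) j =>
        let t0 := max (max (st.1 (k, j + 1) + pvLook sm (pvChS (xs.getD k ' ')) "-")
                           (st.1 (k + 1, j) + pvLook sm "-" (pvChS (ys.getD j ' '))))
                      (st.1 (k, j) + pvLook sm (pvChS (xs.getD k ' ')) (pvChS (ys.getD j ' ')))
        let temp := if g = 0 ∧ t0 < 0 then 0 else t0
        (pvMatUpd st.1 (k + 1, j + 1) temp, if temp > st.2 then temp else st.2)) (MA3 xs ys sm g k 0, bacc)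
    = (MA3 xs ys sm g k l, (accRow xs ys sm g k l).foldl (fun b v => max b v) bacc) := by
  intro l
  induction l with
  | zero => intro _ bacc; rfl
  | succ l ih =>
    intro hl bacc
    rw [List.range_succ, List.foldl_append, ih (by omega) bacc]
    simp only [List.foldl_cons, List.foldl_nil]
    have hl' : l < ys.length := by omega
    have htemp : (if g = 0 ∧ (max (max ((MA3 xs ys sm g k l) (k, l + 1) + pvLook sm (pvChS (xs.getD k ' ')) "-")
                           ((MA3 xs ys sm g k l) (k + 1, l) + pvLook sm "-" (pvChS (ys.getD l ' '))))
                      ((MA3 xs ys sm g k l) (k, l) + pvLook sm (pvChS (xs.getD k ' ')) (pvChS (ys.getD l ' ')))) < 0 then 0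
        else (max (max ((MA3 xs ys sm g k l) (k, l + 1) + pvLook sm (pvChS (xs.getD k ' ')) "-")
                           ((MA3 xs ys sm g k l) (k + 1, l) + pvLook sm "-" (pvChS (ys.getD l ' '))))
                      ((MA3 xs ys sm g k l) (k, l) + pvLook sm (pvChS (xs.getD k ' ')) (pvChS (ys.getD l ' '))))) = pvCell xs ys sm g (k + 1) (l + 1) := by
      rw [MA3_read1 xs ys sm g hk hl', MA3_read2 xs ys sm g hk hl', MA3_read3 xs ys sm g hk hl',
          pvCell_succ_succ]
      rfl
    refine Prod.ext ?_ ?_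
    · show pvMatUpd (MA3 xs ys sm g k l) (k + 1, l + 1) _ = _
      rw [htemp, MA3_upd xs ys sm g hk hl']
    · show (if _ > _ then _ else _) = _
      rw [htemp, pvMaxIf]
      have : accRow xs ys sm g k (l + 1) = accRow xs ys sm g k l ++ [pvCell xs ys sm g (k + 1) (l + 1)] := by
        simp [accRow, List.range_succ]
      rw [this, List.foldl_append]; rfl

theorem stage3_outer (xs ys : List Char) (sm : List (String × List (String × Int))) (g : Int) :
    ∀ k, k ≤ xs.length → ∀ bacc : Int,
    (List.range k).foldl (fun (st : (Nat × Nat → Int) × Int) i =>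
      (List.range ys.length).foldl (fun (st : (Nat × Nat → Int) × Int) j =>
        let t0 := max (max (st.1 (i, j + 1) + pvLook sm (pvChS (xs.getD i ' ')) "-")
                           (st.1 (i + 1, j) + pvLook sm "-" (pvChS (ys.getD j ' '))))
                      (st.1 (i, j) + pvLook sm (pvChS (xs.getD i ' ')) (pvChS (ys.getD j ' ')))
        let temp := if g = 0 ∧ t0 < 0 then 0 else t0
        (pvMatUpd st.1 (i + 1, j + 1) temp, if temp > st.2 then temp else st.2)) st) (MA3 xs ys sm g 0 0, bacc)
    = (MA3 xs ys sm g k 0, (accInt xs ys sm g k).foldl (fun b v => max b v) bacc) := by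
  intro k
  induction k with
  | zero => intro _ bacc; rfl
  | succ k ih =>
    intro hk bacc
    rw [List.range_succ, List.foldl_append, ih (by omega) bacc]
    simp only [List.foldl_cons, List.foldl_nil]
    have hk' : k < xs.length := by omega
    rw [stage3_inner xs ys sm g hk' ys.length (Nat.le_refl _)]
    rw [MA3_rowend]
    have : accInt xs ys sm g (k + 1) = accInt xs ys sm g k ++ accRow xs ys sm g k ys.length := by
      simp [accInt, List.range_succ]
    rw [this, List.foldl_append]

theorem portA_eq (seq_x seq_y : String) (sm : List (String × List (String × Int))) (g : Int) :
    compute_alignment_matrix_1 seq_x seq_y sm g =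
      ((accEdgeX seq_x.toList seq_y.toList sm g seq_x.toList.length ++
        accEdgeY seq_x.toList seq_y.toList sm g seq_y.toList.length) ++
        accInt seq_x.toList seq_y.toList sm g seq_x.toList.length).foldl (fun b v => max b v) (-1) := by
  have h1 := stage1 seq_x.toList seq_y.toList sm g seq_x.toList.length (-1)
  rw [MA1_zero] at h1
  have h2 := stage2 seq_x.toList seq_y.toList sm g seq_y.toList.length (Nat.le_refl _)
    ((accEdgeX seq_x.toList seq_y.toList sm g seq_x.toList.length).foldl (fun b v => max b v) (-1))
  rw [MA2_zero] at h2
  have h3 := stage3_outer seq_x.toList seq_y.toList sm g seq_x.toList.length (Nat.le_refl _)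
    ((accEdgeY seq_x.toList seq_y.toList sm g seq_y.toList.length).foldl (fun b v => max b v)
      ((accEdgeX seq_x.toList seq_y.toList sm g seq_x.toList.length).foldl (fun b v => max b v) (-1)))
  rw [MA3_zero] at h3
  simp only [compute_alignment_matrix_1]
  rw [h1, h2, h3]
  simp [List.foldl_append]

-- B's inner reduction loop, for a row i + 1 (the (0,0) skip never fires)
theorem rowFoldSucc (xs ys : List Char) (sm : List (String × List (String × Int))) (g : Int) (i : Nat) (b : Int) :
    (List.range (ys.length + 1)).foldl (fun best j =>
        if i + 1 = 0 ∧ j = 0 then best else max best (pvCell xs ys sm g (i + 1) j)) b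
    = ((List.range (ys.length + 1)).map (fun j => pvCell xs ys sm g (i + 1) j)).foldl
        (fun b v => max b v) b := by
  rw [List.foldl_map]
  simp

-- B's inner reduction loop for row 0: the (0,0) cell is skipped
theorem rowFoldZero (xs ys : List Char) (sm : List (String × List (String × Int))) (g : Int) (b : Int) :
    (List.range (ys.length + 1)).foldl (fun best j =>
        if (0 : Nat) = 0 ∧ j = 0 then best else max best (pvCell xs ys sm g 0 j)) b
    = (accEdgeY xs ys sm g ys.length).foldl (fun b v => max b v) b := by
  rw [List.range_succ_eq_map, List.foldl_cons]
  simp only [accEdgeY]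
  rw [List.foldl_map, List.foldl_map]
  simp

theorem foldl_max_flatMap (L : List Nat) (f : Nat → List Int) (b : Int) :
    L.foldl (fun b i => (f i).foldl (fun b v => max b v) b) b
      = (L.flatMap f).foldl (fun b v => max b v) b := by
  induction L generalizing b with
  | nil => rfl
  | cons a L ih => simp only [List.flatMap_cons, List.foldl_append, List.foldl_cons]; rw [ih]

theorem portB_eq (seq_x seq_y : String) (sm : List (String × List (String × Int))) (g : Int) :
    compute_alignment_matrix_1_alt seq_x seq_y sm g =
      (accEdgeY seq_x.toList seq_y.toList sm g seq_y.toList.length ++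
       (List.range seq_x.toList.length).flatMap
         (fun i => (List.range (seq_y.toList.length + 1)).map (fun j => pvCell seq_x.toList seq_y.toList sm g (i + 1) j))).foldl
        (fun b v => max b v) (-1) := by
  simp only [compute_alignment_matrix_1_alt]
  rw [show List.range (seq_x.toList.length + 1)
        = 0 :: (List.range seq_x.toList.length).map Nat.succ from List.range_succ_eq_map]
  rw [List.foldl_cons]
  rw [rowFoldZero seq_x.toList seq_y.toList sm g (-1)]
  rw [List.foldl_map]
  have hrows : ∀ b : Int, (List.range seq_x.toList.length).foldl
      (fun b i => (List.range (seq_y.toList.length + 1)).foldl (fun best j =>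
        if Nat.succ i = 0 ∧ j = 0 then best
        else max best (pvCell seq_x.toList seq_y.toList sm g (Nat.succ i) j)) b) b
      = ((List.range seq_x.toList.length).flatMap
          (fun i => (List.range (seq_y.toList.length + 1)).map (fun j => pvCell seq_x.toList seq_y.toList sm g (i + 1) j))).foldl
          (fun b v => max b v) b := by
    intro b
    rw [← foldl_max_flatMap]
    apply PySem.List.foldl_congr_mem
    intro acc i _
    exact rowFoldSucc seq_x.toList seq_y.toList sm g i acc
  rw [hrows, List.foldl_append]

theorem pvPermCons (f : Nat → Int) (gl : Nat → List Int) :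
    ∀ L : List Nat, (L.map f ++ L.flatMap gl).Perm (L.flatMap fun i => f i :: gl i) := by
  intro L
  induction L with
  | nil => rfl
  | cons a L ih =>
    simp only [List.map_cons, List.flatMap_cons, List.cons_append]
    refine List.Perm.trans ?_ (List.Perm.cons (f a) (List.Perm.append_left (gl a) ih))
    refine List.Perm.cons (f a) ?_
    exact List.perm_append_comm_assoc (L.map f) (gl a) (L.flatMap gl)

theorem chunk_eq (xs ys : List Char) (sm : List (String × List (String × Int))) (g : Int) (i : Nat) :
    (List.range (ys.length + 1)).map (fun j => pvCell xs ys sm g (i + 1) j)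
      = pvCell xs ys sm g (i + 1) 0 :: accRow xs ys sm g i ys.length := by
  rw [List.range_succ_eq_map, List.map_cons, List.map_map, accRow]
  rfl

-- ===== VERDICT (by name: the statement is the Claim_ definition above) =====
theorem compute_alignment_matrix_1_spec : Claim_equal_compute_alignment_matrix_1 := by
  intro seq_x seq_y sm g _ _
  unfold Spec_compute_alignment_matrix_1
  rw [portA_eq, portB_eq]
  haveI : RightCommutative (fun (b v : Int) => max b v) := ⟨fun b a1 a2 => max_right_comm b a1 a2⟩
  apply List.Perm.foldl_eq
  have hflat : (List.range seq_x.toList.length).flatMap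
      (fun i => (List.range (seq_y.toList.length + 1)).map (fun j => pvCell seq_x.toList seq_y.toList sm g (i + 1) j))
      = (List.range seq_x.toList.length).flatMap
        (fun i => pvCell seq_x.toList seq_y.toList sm g (i + 1) 0 :: accRow seq_x.toList seq_y.toList sm g i seq_y.toList.length) := by
    exact congrArg (fun h => List.flatMap h (List.range seq_x.toList.length))
      (funext fun i => chunk_eq seq_x.toList seq_y.toList sm g i)
  rw [hflat]
  rw [List.append_assoc]
  refine List.Perm.trans (List.perm_append_comm_assoc _ _ _) ?_
  exact List.Perm.append_left _ (pvPermCons _ _ (List.range seq_x.toList.length))
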